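-- pv_equiv track=rewrite | github.com/printfll/python_exercise | output_files.py | output_files
-- ===== SOURCE A (Python) =====
-- import collections
--
-- def output_files(files):
--     cnt = collections.defaultdict(int)
--     readable_files = []
--     for file_name, permission in files.items():
--         arr = file_name.split("/")[:-1]
--         for i in range(len(arr)):
--             cnt["/".join(arr[:i+1])]+=1
--         if permission:
--             for i in range(len(arr)):
--                 cnt["/".join(arr[:i+1])]-=1
--             readable_files.append(file_name)
--     result = set()
--     for file_name in readable_files:
--         find = False
--         arr = file_name.split("/")[:-1]
--         for i in range(len(arr)):
--             path = "/".join(arr[:i+1])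
--             if not cnt[path]:
--                 find = True
--                 result.add(path)
--                 break
--         if not find:
--             result.add(file_name)
--     return result
-- ===== SOURCE B (Python) =====
-- def output_files(files):
--     # no prefix index at all: keep the raw directory-component lists of the
--     # unreadable files and test each candidate prefix by direct slice comparison
--     bad = []
--     readable = []
--     for file_name, permission in files.items():
--         if permission:
--             readable.append(file_name)
--         else:
--             bad.append(file_name.split("/")[:-1])
--     result = set()
--     for file_name in readable:
--         arr = file_name.split("/")[:-1]
--         chosen = file_name
--         for i in range(len(arr)):
--             if all(b[:i+1] != arr[:i+1] for b in bad):
--                 chosen = "/".join(arr[:i+1])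
--                 break
--         result.add(chosen)
--     return result
-- ===== Notes on version B (the rewrite author's own statement) =====
-- stated objective: alternative
-- what changed: B builds no prefix index at all: instead of A's defaultdict counter keyed by every joined directory-prefix string (incremented for all files, decremented back for readable ones), B keeps the raw directory-component lists of unreadable files and, for each readable file, finds its shortest safe prefix by direct component-slice comparison against that list, joining a prefix string only for the chosen answer.
import Mathlib
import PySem

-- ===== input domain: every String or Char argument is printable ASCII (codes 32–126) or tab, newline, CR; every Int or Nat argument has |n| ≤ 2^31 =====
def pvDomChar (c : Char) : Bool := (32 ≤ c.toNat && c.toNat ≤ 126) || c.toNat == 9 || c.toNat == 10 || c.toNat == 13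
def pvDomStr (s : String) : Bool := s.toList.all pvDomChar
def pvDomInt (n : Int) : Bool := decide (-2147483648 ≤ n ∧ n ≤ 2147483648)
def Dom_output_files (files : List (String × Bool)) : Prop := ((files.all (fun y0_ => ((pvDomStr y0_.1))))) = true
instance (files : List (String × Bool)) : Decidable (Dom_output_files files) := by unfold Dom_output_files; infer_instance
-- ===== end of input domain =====

-- B drops A's counter of materialised prefix strings entirely: it keeps the raw
-- directory-component lists of the unreadable files and tests each candidate prefix
-- by direct slice comparison against them (objective: alternative).
-- The dict argument is the association list `files`; both ports iterate (Dict.ofList files).items.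

-- shared helpers (both Pythons compute arr = file_name.split("/")[:-1] and range(len(arr)))
def pvArr (name : String) : List String :=
  PySem.List.slice ((PySem.Str.split? name "/").getD []) none (some (-1))
-- "/".join(arr[:i+1])
def pvPref (name : String) (i : Int) : String :=
  PySem.Str.join "/" (PySem.List.slice (pvArr name) none (some (i + 1)))
-- range(len(arr))
def pvIdx (name : String) : List Int :=
  PySem.List.pyRange 0 ((pvArr name).length : Int) 1

-- ===== PORT A =====
-- one iteration of A's first loop: count every prefix, then un-count readable files' prefixes
def pvStepA (st : PySem.Dict String Int × List String) (fp : String × Bool) :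
    PySem.Dict String Int × List String :=
  let cnt := (pvIdx fp.1).foldl (fun c i => c.modify (pvPref fp.1 i) 0 (· + 1)) st.1
  if fp.2 then
    ((pvIdx fp.1).foldl (fun c i => c.modify (pvPref fp.1 i) 0 (· - 1)) cnt, st.2 ++ [fp.1])
  else (cnt, st.2)

-- A's second loop body: shortest prefix with cnt[path] == 0, else the file name
def pvPickA (cnt : PySem.Dict String Int) (res : PySem.Set String) (name : String) :
    PySem.Set String :=
  match (pvIdx name).find? (fun i => cnt.getD (pvPref name i) 0 == 0) with
  | some i => PySem.Set.add res (pvPref name i)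
  | none => PySem.Set.add res name

-- A's result loop over readable_files
def pvFinishA (st : PySem.Dict String Int × List String) : List String :=
  st.2.foldl (pvPickA st.1) PySem.Set.empty

def output_files (files : List (String × Bool)) : List String :=
  pvFinishA (((PySem.Dict.ofList files).items).foldl pvStepA (PySem.Dict.empty, []))

-- ===== PORT B =====
-- B's single collect loop: readable names on one side, the raw component lists of unreadable files on the other
def pvStepB (st : List (List String) × List String) (fp : String × Bool) :
    List (List String) × List String :=
  if fp.2 then (st.1, st.2 ++ [fp.1]) else (st.1 ++ [pvArr fp.1], st.2)

-- B's second loop body: first i whose component slice matches no bad list, else the file name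
def pvPickB (bad : List (List String)) (res : PySem.Set String) (name : String) :
    PySem.Set String :=
  match (pvIdx name).find? (fun i =>
      bad.all (fun b => !(PySem.List.slice b none (some (i + 1))
                            == PySem.List.slice (pvArr name) none (some (i + 1))))) with
  | some i => PySem.Set.add res (PySem.Str.join "/" (PySem.List.slice (pvArr name) none (some (i + 1))))
  | none => PySem.Set.add res name

-- B's result loop over readable
def pvFinishB (st : List (List String) × List String) : List String :=
  st.2.foldl (pvPickB st.1) PySem.Set.empty

def output_files_alt (files : List (String × Bool)) : List String :=
  pvFinishB (((PySem.Dict.ofList files).items).foldl pvStepB ([], []))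

-- ===== PRECONDITION & SPEC =====
def Spec_output_files (files : List (String × Bool)) (out : List String) : Prop := out = output_files_alt files
instance (files : List (String × Bool)) (out : List String) : Decidable (Spec_output_files files out) := by unfold Spec_output_files; infer_instance

-- ===== CLAIM (what is proved, stated in full; the proofs are below) =====
def Claim_equal_output_files : Prop := ∀ (files : List (String × Bool)), Dom_output_files files → Spec_output_files files (output_files files)

-- ===== LEMMAS AND PROOFS =====

-- the prefixes of one file, and the multiset of tainted prefixes of a file list
def pvPrefixes (name : String) : List String := (pvIdx name).map (pvPref name)
def pvTaint (items : List (String × Bool)) : List String :=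
  (items.filter (fun fp => !fp.2)).flatMap (fun fp => pvPrefixes fp.1)

theorem pvTaint_cons (a : String × Bool) (l : List (String × Bool)) :
    pvTaint (a :: l) = (if a.2 then [] else pvPrefixes a.1) ++ pvTaint l := by
  by_cases h : a.2 <;> simp [pvTaint, h]

theorem getD_foldl_modify_sub_one (l : List String) (d : PySem.Dict String Int) (v : String) :
    (l.foldl (fun c p => c.modify p 0 (· - 1)) d).getD v 0 = d.getD v 0 - l.count v := by
  induction l generalizing d with
  | nil => simp
  | cons a l ih =>
    simp only [List.foldl_cons, ih, PySem.Dict.getD_modify, List.count_cons, beq_iff_eq]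
    by_cases h : v = a
    · simp [h]; ring
    · simp [h, Ne.symm h]

theorem foldl_idx_modify (name : String) (f : Int → Int) (d : PySem.Dict String Int) :
    (pvIdx name).foldl (fun c i => c.modify (pvPref name i) 0 f) d
      = (pvPrefixes name).foldl (fun c p => c.modify p 0 f) d := by
  rw [pvPrefixes, List.foldl_map]

theorem stepA_cnt (st : PySem.Dict String Int × List String) (fp : String × Bool) (v : String) :
    (pvStepA st fp).1.getD v 0 =
      st.1.getD v 0 + (if fp.2 then ([] : List String) else pvPrefixes fp.1).count v := by
  unfold pvStepA
  cases hf : fp.2 with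
  | false =>
    simp only [Bool.false_eq_true, if_false]
    rw [foldl_idx_modify, PySem.Dict.getD_foldl_modify_add_one]
  | true =>
    simp only [if_true, List.count_nil]
    rw [foldl_idx_modify, foldl_idx_modify, getD_foldl_modify_sub_one,
      PySem.Dict.getD_foldl_modify_add_one]
    simp

theorem stepA_read (st : PySem.Dict String Int × List String) (fp : String × Bool) :
    (pvStepA st fp).2 = st.2 ++ (if fp.2 then [fp.1] else []) := by
  by_cases h : fp.2 <;> simp [pvStepA, h]

theorem foldA_cnt (items : List (String × Bool)) (st : PySem.Dict String Int × List String)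
    (v : String) :
    ((items.foldl pvStepA st).1).getD v 0 = st.1.getD v 0 + (pvTaint items).count v := by
  induction items generalizing st with
  | nil => simp [pvTaint]
  | cons a l ih =>
    rw [List.foldl_cons, ih, stepA_cnt, pvTaint_cons, List.count_append]
    by_cases h : a.2 <;> simp [h] <;> ring

theorem foldA_read (items : List (String × Bool)) (st : PySem.Dict String Int × List String) :
    (items.foldl pvStepA st).2 = st.2 ++ (items.filter (fun fp => fp.2)).map (fun fp => fp.1) := by
  induction items generalizing st with
  | nil => simp
  | cons a l ih =>
    rw [List.foldl_cons, ih, stepA_read]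
    by_cases h : a.2 <;> simp [h]

theorem foldB_bad (items : List (String × Bool)) (st : List (List String) × List String) :
    (items.foldl pvStepB st).1
      = st.1 ++ (items.filter (fun fp => !fp.2)).map (fun fp => pvArr fp.1) := by
  induction items generalizing st with
  | nil => simp
  | cons a l ih =>
    rw [List.foldl_cons, ih]
    by_cases h : a.2 <;> simp [pvStepB, h]

theorem foldB_read (items : List (String × Bool)) (st : List (List String) × List String) :
    (items.foldl pvStepB st).2 = st.2 ++ (items.filter (fun fp => fp.2)).map (fun fp => fp.1) := by
  induction items generalizing st with
  | nil => simp
  | cons a l ih =>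
    rw [List.foldl_cons, ih]
    by_cases h : a.2 <;> simp [pvStepB, h]

-- every piece produced by split("/") is slash-free
theorem go_noSlash (fuel : Nat) : ∀ (l cur : List Char) (acc : List (List Char)),
    l.length < fuel → (∀ p ∈ acc, '/' ∉ p) → '/' ∉ cur →
    ∀ p ∈ PySem.Chars.splitOn.go ['/'] fuel l cur acc, '/' ∉ p := by
  induction fuel with
  | zero => intro l cur acc h; omega
  | succ n ih =>
    intro l cur acc hlen hacc hcur
    cases l with
    | nil =>
      rw [PySem.Chars.splitOn.go.eq_def]
      intro p hp
      simp only [List.mem_reverse, List.mem_cons] at hp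
      rcases hp with h | h
      · subst h; simpa using hcur
      · exact hacc _ h
    | cons c rest =>
      rw [PySem.Chars.splitOn.go.eq_def]
      by_cases hc : c = '/'
      · have hpre : List.isPrefixOf ['/'] (c :: rest) = true := by
          simp [List.isPrefixOf, hc]
        simp only [hpre, if_true]
        have : List.drop (List.length ['/']) (c :: rest) = rest := by simp
        rw [this]
        refine ih rest [] (cur.reverse :: acc) (by simp only [List.length_cons] at hlen; omega) ?_ (by simp)
        intro p hp
        rcases List.mem_cons.1 hp with h | h
        · subst h; simpa using hcur
        · exact hacc _ h
      · have hpre : List.isPrefixOf ['/'] (c :: rest) = false := by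
          simp [List.isPrefixOf]; exact fun h => hc h.symm
        simp only [hpre, Bool.false_eq_true, if_false]
        refine ih rest (c :: cur) acc (by simp only [List.length_cons] at hlen; omega) hacc ?_
        intro h
        rcases List.mem_cons.1 h with h | h
        · exact hc h.symm
        · exact hcur h

theorem split_eq (name : String) :
    (PySem.Str.split? name "/").getD []
      = (PySem.Chars.splitOn name.toList ['/']).map String.ofList := by
  simp [PySem.Str.split?, PySem.Chars.split?]

theorem arr_noSlash (name : String) : ∀ p ∈ pvArr name, '/' ∉ p.toList := by
  intro p hp
  unfold pvArr at hp
  rw [PySem.List.slice_to_neg_one, split_eq] at hp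
  have hp' := List.dropLast_subset _ hp
  rcases List.mem_map.1 hp' with ⟨q, hq, rfl⟩
  have : '/' ∉ q := by
    unfold PySem.Chars.splitOn at hq
    exact go_noSlash _ _ _ _ (by omega) (by simp) (by simp) q hq
  simpa using this

-- cancelling a separator-free head: a ++ '/' :: r determines a and r
theorem sep_cancel : ∀ (a b r s : List Char), '/' ∉ a → '/' ∉ b →
    a ++ '/' :: r = b ++ '/' :: s → a = b ∧ r = s := by
  intro a
  induction a with
  | nil =>
    intro b r s _ hb h
    cases b with
    | nil => simpa using h
    | cons x b =>
      simp only [List.nil_append, List.cons_append, List.cons.injEq] at h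
      exact absurd (h.1 ▸ List.mem_cons_self) hb
  | cons x a ih =>
    intro b r s ha hb h
    cases b with
    | nil =>
      simp only [List.cons_append, List.nil_append, List.cons.injEq] at h
      exact absurd (h.1.symm ▸ List.mem_cons_self) ha
    | cons y b =>
      simp only [List.cons_append, List.cons.injEq] at h
      obtain ⟨rfl, h2⟩ := h
      have := ih b r s (fun hm => ha (List.mem_cons_of_mem _ hm))
        (fun hm => hb (List.mem_cons_of_mem _ hm)) h2
      exact ⟨by rw [this.1], this.2⟩

-- join "/" is injective on nonempty lists of slash-free pieces
theorem joinC_inj : ∀ (xs ys : List (List Char)), (∀ p ∈ xs, '/' ∉ p) → (∀ p ∈ ys, '/' ∉ p) →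
    xs ≠ [] → ys ≠ [] → PySem.Chars.join ['/'] xs = PySem.Chars.join ['/'] ys → xs = ys := by
  intro xs
  induction xs with
  | nil => intro ys _ _ hx; exact absurd rfl hx
  | cons x xs ih =>
    intro ys hxs hys _ hyne h
    cases ys with
    | nil => exact absurd rfl hyne
    | cons y ys =>
      cases xs with
      | nil =>
        cases ys with
        | nil =>
          rw [PySem.Chars.join_singleton, PySem.Chars.join_singleton] at h
          rw [h]
        | cons y' ys =>
          rw [PySem.Chars.join_singleton, PySem.Chars.join_cons_cons] at h
          exact absurd (h ▸ (by simp : '/' ∈ y ++ ['/'] ++ PySem.Chars.join ['/'] (y' :: ys)))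
            (hxs x List.mem_cons_self)
      | cons x' xs =>
        cases ys with
        | nil =>
          rw [PySem.Chars.join_singleton, PySem.Chars.join_cons_cons] at h
          exact absurd (h.symm ▸ (by simp : '/' ∈ x ++ ['/'] ++ PySem.Chars.join ['/'] (x' :: xs)))
            (hys y List.mem_cons_self)
        | cons y' ys =>
          rw [PySem.Chars.join_cons_cons, PySem.Chars.join_cons_cons,
            List.append_assoc, List.append_assoc] at h
          simp only [List.singleton_append] at h
          obtain ⟨h1, h2⟩ := sep_cancel x y _ _ (hxs x List.mem_cons_self)
            (hys y List.mem_cons_self) h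
          have := ih (y' :: ys) (fun p hp => hxs p (List.mem_cons_of_mem _ hp))
            (fun p hp => hys p (List.mem_cons_of_mem _ hp)) (by simp) (by simp) h2
          rw [h1, this]

theorem joinS_inj (xs ys : List String) (hxs : ∀ p ∈ xs, '/' ∉ p.toList)
    (hys : ∀ p ∈ ys, '/' ∉ p.toList) (hxne : xs ≠ []) (hyne : ys ≠ []) :
    PySem.Str.join "/" xs = PySem.Str.join "/" ys → xs = ys := by
  intro h
  have h' := congrArg String.toList h
  rw [PySem.Str.toList_join, PySem.Str.toList_join] at h'
  have hsep : ("/" : String).toList = ['/'] := rfl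
  rw [hsep] at h'
  have := joinC_inj (xs.map String.toList) (ys.map String.toList)
    (by intro p hp; rcases List.mem_map.1 hp with ⟨q, hq, rfl⟩; exact hxs q hq)
    (by intro p hp; rcases List.mem_map.1 hp with ⟨q, hq, rfl⟩; exact hys q hq)
    (by simpa using hxne) (by simpa using hyne) h'
  have h2 := congrArg (List.map String.ofList) this
  simpa [List.map_map, Function.comp_def] using h2

-- pvPref with a natural index is the join of the (j+1)-take
theorem pvPref_natCast (name : String) (j : Nat) :
    pvPref name (j : Int) = PySem.Str.join "/" ((pvArr name).take (j + 1)) := by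
  unfold pvPref
  have : ((j : Int) + 1) = ((j + 1 : Nat) : Int) := by push_cast; ring
  rw [this, PySem.List.slice_to_natCast]

-- the key bridge: a prefix string of `name` occurs among u's prefixes
-- exactly when the component slices agree
theorem mem_prefixes_iff (u name : String) (j : Nat) (hj : j < (pvArr name).length) :
    pvPref name (j : Int) ∈ pvPrefixes u
      ↔ (pvArr u).take (j + 1) = (pvArr name).take (j + 1) := by
  constructor
  · intro h
    rcases List.mem_map.1 h with ⟨i, hi, hpref⟩
    rw [pvIdx, PySem.List.mem_pyRange_one] at hi
    obtain ⟨hi0, hilt⟩ := hi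
    set k := i.toNat with hk
    have hik : i = (k : Int) := by omega
    have hklt : k < (pvArr u).length := by omega
    rw [hik, pvPref_natCast, pvPref_natCast] at hpref
    have heq := joinS_inj _ _
      (fun p hp => arr_noSlash u p (List.take_subset _ _ hp))
      (fun p hp => arr_noSlash name p (List.take_subset _ _ hp))
      (by have : ((pvArr u).take (k+1)).length = k+1 := by
            rw [List.length_take]; omega
          intro hnil; rw [hnil] at this; simp at this)
      (by have : ((pvArr name).take (j+1)).length = j+1 := by
            rw [List.length_take]; omega
          intro hnil; rw [hnil] at this; simp at this)
      hpref
    have hlen := congrArg List.length heq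
    rw [List.length_take, List.length_take] at hlen
    have hkj : k = j := by omega
    rw [hkj] at heq
    exact heq
  · intro h
    have hlen := congrArg List.length h
    rw [List.length_take, List.length_take] at hlen
    have hjb : j < (pvArr u).length := by omega
    refine List.mem_map.2 ⟨(j : Int), ?_, ?_⟩
    · rw [pvIdx, PySem.List.mem_pyRange_one]
      constructor
      · exact Int.natCast_nonneg j
      · exact_mod_cast hjb
    · rw [pvPref_natCast, pvPref_natCast, h]

-- slice with a natural bound on the B side
theorem sliceB_eq (b : List String) (j : Nat) :
    PySem.List.slice b none (some ((j : Int) + 1)) = b.take (j + 1) := by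
  have : ((j : Int) + 1) = ((j + 1 : Nat) : Int) := by push_cast; ring
  rw [this, PySem.List.slice_to_natCast]

-- helper: find? of pointwise-equal predicates
theorem find?_congr' {α : Type} (l : List α) (p q : α → Bool)
    (h : ∀ a ∈ l, p a = q a) : l.find? p = l.find? q := by
  induction l with
  | nil => rfl
  | cons a l ih =>
    simp only [List.find?_cons]
    rw [h a List.mem_cons_self]
    cases q a
    · exact ih (fun a ha => h a (List.mem_cons_of_mem _ ha))
    · rfl

theorem pick_eq (items : List (String × Bool)) :
    pvPickA ((items.foldl pvStepA (PySem.Dict.empty, [])).1)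
      = pvPickB ((items.foldl pvStepB ([], [])).1) := by
  funext res name
  unfold pvPickA pvPickB
  have hfind : (pvIdx name).find? (fun i =>
        ((items.foldl pvStepA (PySem.Dict.empty, [])).1).getD (pvPref name i) 0 == 0)
      = (pvIdx name).find? (fun i =>
        ((items.foldl pvStepB ([], [])).1).all (fun b =>
          !(PySem.List.slice b none (some (i + 1))
              == PySem.List.slice (pvArr name) none (some (i + 1))))) := by
    apply find?_congr'
    intro i hi
    rw [pvIdx, PySem.List.mem_pyRange_one] at hi
    obtain ⟨hi0, hilt⟩ := hi
    set j := i.toNat with hjdef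
    have hij : i = (j : Int) := by omega
    have hjlt : j < (pvArr name).length := by omega
    rw [foldA_cnt, foldB_bad, hij]
    simp only [PySem.Dict.getD_empty, zero_add, List.nil_append]
    rw [Bool.eq_iff_iff, beq_iff_eq, List.all_eq_true]
    have hA : ((pvTaint items).count (pvPref name (j : Int)) : Int) = 0
        ↔ pvPref name (j : Int) ∉ pvTaint items := by
      rw [Int.natCast_eq_zero, List.count_eq_zero]
    rw [hA]
    have hmemT : pvPref name (j : Int) ∈ pvTaint items
        ↔ ∃ fp ∈ items.filter (fun fp => !fp.2),
            pvPref name (j : Int) ∈ pvPrefixes fp.1 := by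
      simp [pvTaint, List.mem_flatMap]
    rw [hmemT]
    constructor
    · intro hno b hb
      rcases List.mem_map.1 hb with ⟨fp, hfp, rfl⟩
      rw [sliceB_eq, sliceB_eq]
      simp only [Bool.not_eq_eq_eq_not, Bool.not_true, beq_eq_false_iff_ne, ne_eq]
      intro hEq
      exact hno ⟨fp, hfp, (mem_prefixes_iff fp.1 name j hjlt).2 hEq⟩
    · rintro hall ⟨fp, hfp, hmem⟩
      have := hall (pvArr fp.1) (List.mem_map.2 ⟨fp, hfp, rfl⟩)
      rw [sliceB_eq, sliceB_eq] at this
      simp only [Bool.not_eq_eq_eq_not, Bool.not_true, beq_eq_false_iff_ne, ne_eq] at this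
      exact this ((mem_prefixes_iff fp.1 name j hjlt).1 hmem)
  rw [hfind]
  rfl

theorem finish_eq (items : List (String × Bool)) :
    pvFinishA (items.foldl pvStepA (PySem.Dict.empty, []))
      = pvFinishB (items.foldl pvStepB ([], [])) := by
  unfold pvFinishA pvFinishB
  rw [foldA_read, foldB_read, pick_eq]

-- ===== VERDICT (by name: the statement is the Claim_ definition above) =====
theorem output_files_spec : Claim_equal_output_files := by
  intro files _
  exact finish_eq _
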